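-- pv_equiv track=rewrite | github.com/park9707/Algorithm | programmers/퍼즐 게임 챌린지/퍼즐 게임 챌린지.py | solution
-- ===== SOURCE A (Python) =====
-- def solution(diffs, times, limit):
--     max_level, min_level = max(diffs), 1
--
--     while min_level < max_level:
--         mid = (min_level + max_level) // 2
--         n = times[0]
--         for i in range(1, len(diffs)):
--             n += max(diffs[i] - mid, 0) * (times[i - 1] + times[i]) + times[i]
--
--         if n > limit:
--             min_level = mid + 1
--         else:
--             max_level = mid
--     return min_level
-- ===== SOURCE B (Python) =====
-- def solution(diffs, times, limit):
--     lo, hi = 1, max(diffs)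
--     if hi <= lo:
--         return lo
--     # base time (independent of level) and (difficulty, weight) pairs
--     base = times[0]
--     pairs = []
--     for i in range(1, len(diffs)):
--         base += times[i]
--         pairs.append((diffs[i], times[i - 1] + times[i]))
--     pairs.sort(key=lambda p: p[0])
--     ds = [d for d, _ in pairs]
--     # prefix sums of weights and of difficulty*weight over the sorted pairs
--     pc = [0]
--     pdc = [0]
--     for d, c in pairs:
--         pc.append(pc[-1] + c)
--         pdc.append(pdc[-1] + d * c)
--     m = len(pairs)
--
--     def total(mid):
--         # least k with ds[k] > mid (hand-written bisect)
--         a, b = 0, m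
--         while a < b:
--             md = (a + b) // 2
--             if ds[md] > mid:
--                 b = md
--             else:
--                 a = md + 1
--         return base + (pdc[m] - pdc[a]) - mid * (pc[m] - pc[a])
--
--     while lo < hi:
--         mid = (lo + hi) // 2
--         if total(mid) > limit:
--             lo = mid + 1
--         else:
--             hi = mid
--     return lo
-- ===== Notes on version B (the rewrite author's own statement) =====
-- stated objective: faster
-- what changed: B precomputes the level-independent base time and the (difficulty, weight) pairs once, sorts them by difficulty with prefix sums of weight and difficulty*weight, and answers each binary-search feasibility check by an inner binary search over the sorted difficulties plus prefix-sum arithmetic instead of rescanning all puzzles.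
import Mathlib
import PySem

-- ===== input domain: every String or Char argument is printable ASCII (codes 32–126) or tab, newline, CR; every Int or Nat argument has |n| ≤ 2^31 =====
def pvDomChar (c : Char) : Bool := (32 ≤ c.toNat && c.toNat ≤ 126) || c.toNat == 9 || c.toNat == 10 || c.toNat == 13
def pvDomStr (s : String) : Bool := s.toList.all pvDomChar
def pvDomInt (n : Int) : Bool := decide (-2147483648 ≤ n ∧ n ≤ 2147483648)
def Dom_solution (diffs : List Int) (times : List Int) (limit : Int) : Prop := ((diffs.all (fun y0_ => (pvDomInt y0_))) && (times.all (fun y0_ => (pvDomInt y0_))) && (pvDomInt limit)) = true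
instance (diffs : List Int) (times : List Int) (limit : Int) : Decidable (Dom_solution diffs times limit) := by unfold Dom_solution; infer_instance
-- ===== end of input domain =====

-- B replaces A's per-check linear rescan by sort + prefix sums + an inner binary search (asymptotically faster checks).


-- midpoint bounds, used by the ports' termination proofs
theorem pvMidLb (lo hi : Int) (h : lo < hi) : lo ≤ PySem.Int.floordiv (lo + hi) 2 := by
  rw [PySem.Int.le_floordiv_iff_mul_le (by omega)]; omega

theorem pvMidUb (lo hi : Int) (h : lo < hi) : PySem.Int.floordiv (lo + hi) 2 < hi := by
  rw [PySem.Int.floordiv_lt_iff_lt_mul (by omega)]; omega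

-- the two decreasing-measure facts for the binary-search loops
theorem pvDecA (lo hi : Int) (h : lo < hi) :
    (hi - (PySem.Int.floordiv (lo + hi) 2 + 1)).toNat < (hi - lo).toNat := by
  have h1 := pvMidLb lo hi h; have h2 := pvMidUb lo hi h; omega

theorem pvDecB (lo hi : Int) (h : lo < hi) :
    (PySem.Int.floordiv (lo + hi) 2 - lo).toNat < (hi - lo).toNat := by
  have h1 := pvMidLb lo hi h; have h2 := pvMidUb lo hi h; omega

-- ===== PORT A =====
-- one evaluation of A's inner 'for i in range(1, len(diffs))' loop, n starting at times[0]
def aInner (diffs : List Int) (times : List Int) (mid : Int) : Int :=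
  (PySem.List.pyRange 1 (diffs.length) 1).foldl
    (fun n i => n + max (PySem.List.pyGetD diffs i 0 - mid) 0 *
        (PySem.List.pyGetD times (i - 1) 0 + PySem.List.pyGetD times i 0) +
        PySem.List.pyGetD times i 0)
    (PySem.List.pyGetD times 0 0)

-- A's 'while min_level < max_level' loop
def aLoop (diffs : List Int) (times : List Int) (limit lo hi : Int) : Int :=
  if h : lo < hi then
    let mid := PySem.Int.floordiv (lo + hi) 2
    if aInner diffs times mid > limit then aLoop diffs times limit (mid + 1) hi
    else aLoop diffs times limit lo mid
  else lo
termination_by (hi - lo).toNat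
decreasing_by
  · exact pvDecA lo hi h
  · exact pvDecB lo hi h

def solution (diffs : List Int) (times : List Int) (limit : Int) : Int :=
  match PySem.List.max? diffs (fun x => x) with
  | none => 0  -- max([]) raises ValueError; excluded by Pre_solution
  | some mx => aLoop diffs times limit 1 mx

-- ===== PORT B =====
-- B's build loop: base time and the (difficulty, weight) pairs, one pass
def bBuild (diffs : List Int) (times : List Int) : Int × List (Int × Int) :=
  (PySem.List.pyRange 1 (diffs.length) 1).foldl
    (fun s i => (s.1 + PySem.List.pyGetD times i 0,
                 s.2 ++ [(PySem.List.pyGetD diffs i 0,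
                          PySem.List.pyGetD times (i - 1) 0 + PySem.List.pyGetD times i 0)]))
    (PySem.List.pyGetD times 0 0, [])

-- B's hand-written bisect: least index k in [a,b) with ds[k] > mid (b if none)
def bBisect (ds : List Int) (mid a b : Int) : Int :=
  if h : a < b then
    let md := PySem.Int.floordiv (a + b) 2
    if PySem.List.pyGetD ds md 0 > mid then bBisect ds mid a md
    else bBisect ds mid (md + 1) b
  else a
termination_by (b - a).toNat
decreasing_by
  · exact pvDecB a b h
  · exact pvDecA a b h

-- B's total(mid): prefix-sum difference over the suffix of sorted pairs with d > mid
def bTotal (base : Int) (ds pc pdc : List Int) (m mid : Int) : Int :=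
  let a := bBisect ds mid 0 m
  base + (PySem.List.pyGetD pdc m 0 - PySem.List.pyGetD pdc a 0) -
    mid * (PySem.List.pyGetD pc m 0 - PySem.List.pyGetD pc a 0)

-- B's outer 'while lo < hi' loop
def bLoop (base : Int) (ds pc pdc : List Int) (m limit lo hi : Int) : Int :=
  if h : lo < hi then
    let mid := PySem.Int.floordiv (lo + hi) 2
    if bTotal base ds pc pdc m mid > limit then bLoop base ds pc pdc m limit (mid + 1) hi
    else bLoop base ds pc pdc m limit lo mid
  else lo
termination_by (hi - lo).toNat
decreasing_by
  · exact pvDecA lo hi h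
  · exact pvDecB lo hi h

def solution_alt (diffs : List Int) (times : List Int) (limit : Int) : Int :=
  match PySem.List.max? diffs (fun x => x) with
  | none => 0  -- max([]) raises ValueError; excluded by Pre_solution
  | some mx =>
    if mx ≤ 1 then 1
    else
      let bp := bBuild diffs times
      let pairs := PySem.List.sorted bp.2 (fun p => p.1) false
      let ds := pairs.map (fun p => p.1)
      let pcd := pairs.foldl
        (fun s p => (s.1 ++ [PySem.List.pyGetD s.1 (-1) 0 + p.2],
                     s.2 ++ [PySem.List.pyGetD s.2 (-1) 0 + p.1 * p.2]))
        ([0], [0])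
      bLoop bp.1 ds pcd.1 pcd.2 (pairs.length) limit 1 mx

-- ===== PRECONDITION & SPEC =====
-- A raises ValueError on diffs = [] and IndexError when some difficulty exceeds 1 (so the
-- search loop runs) but times is shorter than diffs; Pre_ excludes exactly those inputs.
def Pre_solution (diffs : List Int) (times : List Int) (limit : Int) : Prop :=
  diffs ≠ [] ∧ ((∃ d ∈ diffs, 1 < d) → diffs.length ≤ times.length)
instance (diffs : List Int) (times : List Int) (limit : Int) : Decidable (Pre_solution diffs times limit) := by
  unfold Pre_solution; infer_instance

def pvWitness_solution : List Int × List Int × Int := ([3, 1], [2, 2], 10)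

def Spec_solution (diffs : List Int) (times : List Int) (limit : Int) (out : Int) : Prop := out = solution_alt diffs times limit
instance (diffs : List Int) (times : List Int) (limit : Int) (out : Int) : Decidable (Spec_solution diffs times limit out) := by unfold Spec_solution; infer_instance

-- ===== CLAIM (what is proved, stated in full; the proofs are below) =====
def Claim_equal_solution : Prop := ∀ (diffs : List Int) (times : List Int) (limit : Int), Dom_solution diffs times limit → Pre_solution diffs times limit → Spec_solution diffs times limit (solution diffs times limit)

-- ===== LEMMAS AND PROOFS =====

theorem aInner_eq (diffs times : List Int) (mid : Int) :
    aInner diffs times mid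
      = (PySem.List.pyGetD times 0 0
          + ((PySem.List.pyRange 1 (diffs.length) 1).map (fun i => PySem.List.pyGetD times i 0)).sum)
        + (((PySem.List.pyRange 1 (diffs.length) 1).map
              (fun i => (PySem.List.pyGetD diffs i 0,
                         PySem.List.pyGetD times (i - 1) 0 + PySem.List.pyGetD times i 0))).map
            (fun p => max (p.1 - mid) 0 * p.2)).sum := by
  unfold aInner
  rw [show (fun (n : Int) (i : Int) => n + max (PySem.List.pyGetD diffs i 0 - mid) 0 *
        (PySem.List.pyGetD times (i - 1) 0 + PySem.List.pyGetD times i 0) +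
        PySem.List.pyGetD times i 0)
      = (fun n i => n + ((max (PySem.List.pyGetD diffs i 0 - mid) 0 *
        (PySem.List.pyGetD times (i - 1) 0 + PySem.List.pyGetD times i 0)) +
        PySem.List.pyGetD times i 0)) from by funext n i; ring]
  rw [PySem.List.foldl_add]
  rw [List.map_map]
  have : ∀ l : List Int, (l.map (fun i => max (PySem.List.pyGetD diffs i 0 - mid) 0 *
        (PySem.List.pyGetD times (i - 1) 0 + PySem.List.pyGetD times i 0) +
        PySem.List.pyGetD times i 0)).sum
      = (l.map (fun i => PySem.List.pyGetD times i 0)).sum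
        + (l.map (fun i => max (PySem.List.pyGetD diffs i 0 - mid) 0 *
            (PySem.List.pyGetD times (i - 1) 0 + PySem.List.pyGetD times i 0))).sum := by
    intro l; induction l with
    | nil => simp
    | cons x t ih => simp [ih]; ring
  rw [this]; simp only [Function.comp_def]; ring

theorem bBuild_eq (diffs times : List Int) :
    bBuild diffs times
      = (PySem.List.pyGetD times 0 0
          + ((PySem.List.pyRange 1 (diffs.length) 1).map (fun i => PySem.List.pyGetD times i 0)).sum,
         (PySem.List.pyRange 1 (diffs.length) 1).map
           (fun i => (PySem.List.pyGetD diffs i 0,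
                      PySem.List.pyGetD times (i - 1) 0 + PySem.List.pyGetD times i 0))) := by
  unfold bBuild
  rw [PySem.List.foldl_prod_mk (f := fun a i => a + PySem.List.pyGetD times i 0)
        (g := fun l i => l ++ [(PySem.List.pyGetD diffs i 0,
           PySem.List.pyGetD times (i - 1) 0 + PySem.List.pyGetD times i 0)])]
  rw [PySem.List.foldl_add, PySem.List.foldl_append_singleton_eq_map]
  simp

theorem pfxBuild (f : Int × Int → Int) :
    ∀ (l : List (Int × Int)) (acc : List Int), acc ≠ [] →
      l.foldl (fun s p => s ++ [PySem.List.pyGetD s (-1) 0 + f p]) acc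
        = acc ++ (List.range l.length).map
            (fun k => PySem.List.pyGetD acc (-1) 0 + ((l.take (k + 1)).map f).sum) := by
  intro l
  induction l with
  | nil => intro acc _; simp
  | cons p t ih =>
    intro acc hacc
    simp only [List.foldl_cons]
    rw [ih (acc ++ [PySem.List.pyGetD acc (-1) 0 + f p]) (by simp)]
    rw [PySem.List.pyGetD_neg_one_append_singleton]
    rw [List.append_assoc]
    congr 1
    simp only [List.length_cons, List.range_succ_eq_map, List.map_cons, List.map_map]
    simp only [List.take_succ_cons, List.map_cons, List.sum_cons, List.take_zero, List.map_nil,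
      List.sum_nil, List.singleton_append]
    congr 1
    · ring
    · refine List.map_congr_left (fun k _ => ?_)
      simp only [Function.comp_apply]
      ring

theorem prefix_get (l : List (Int × Int)) (f : Int × Int → Int) (k : Nat) (hk : k ≤ l.length) :
    PySem.List.pyGetD
        (l.foldl (fun s p => s ++ [PySem.List.pyGetD s (-1) 0 + f p]) [0]) (k : Int) 0
      = ((l.take k).map f).sum := by
  rw [pfxBuild f l [0] (by simp)]
  rw [PySem.List.pyGetD_natCast]
  cases k with
  | zero => simp
  | succ j =>
    have hj : j < l.length := by omega
    have h0 : PySem.List.pyGetD [(0 : Int)] (-1) 0 = 0 := by decide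
    simp [List.getD, hj, h0]

theorem bisect_spec (ds : List Int) (mid : Int) (hmono : ds.Pairwise (· ≤ ·)) :
    ∀ (fuel : Nat) (a b : Int), 0 ≤ a → a ≤ b → b ≤ ds.length → (b - a).toNat ≤ fuel →
      (∀ j : Nat, j < a.toNat → ds.getD j 0 ≤ mid) →
      (∀ j : Nat, b.toNat ≤ j → j < ds.length → mid < ds.getD j 0) →
      0 ≤ bBisect ds mid a b ∧ bBisect ds mid a b ≤ ds.length ∧
        (∀ j : Nat, j < (bBisect ds mid a b).toNat → ds.getD j 0 ≤ mid) ∧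
        (∀ j : Nat, (bBisect ds mid a b).toNat ≤ j → j < ds.length → mid < ds.getD j 0) := by
  have mono : ∀ (i j : Nat), i ≤ j → j < ds.length → ds.getD i 0 ≤ ds.getD j 0 := by
    intro i j hij hj
    rcases eq_or_lt_of_le hij with rfl | hlt
    · exact le_refl _
    · rw [List.getD_eq_getElem ds 0 (by omega), List.getD_eq_getElem ds 0 hj]
      exact List.pairwise_iff_getElem.mp hmono i j (by omega) hj hlt
  intro fuel
  induction fuel with
  | zero =>
    intro a b ha hab hb hfuel hl hr
    have hba : b = a := by omega
    rw [bBisect]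
    have : ¬ a < b := by omega
    simp only [this, dif_neg, not_false_iff]
    exact ⟨ha, by omega, fun j hj => hl j hj, fun j hj hj2 => hr j (by omega) hj2⟩
  | succ fuel ih =>
    intro a b ha hab hb hfuel hl hr
    by_cases hlt : a < b
    · rw [bBisect]
      simp only [hlt, dif_pos]
      have hmd1 := pvMidLb a b hlt
      have hmd2 := pvMidUb a b hlt
      set md := PySem.Int.floordiv (a + b) 2 with hmd
      have hmdr : PySem.List.pyGetD ds md 0 = ds.getD md.toNat 0 := by
        have : md = ((md.toNat : Nat) : Int) := by omega
        rw [this, PySem.List.pyGetD_natCast]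
        have he : ((md.toNat : Int)).toNat = md.toNat := by omega
        rw [he]
      by_cases hc : PySem.List.pyGetD ds md 0 > mid
      · simp only [hc, if_pos]
        refine ih a md ha (by omega) (by omega) (by omega) hl ?_
        intro j hj hj2
        calc mid < ds.getD md.toNat 0 := by rw [← hmdr]; exact hc
          _ ≤ ds.getD j 0 := mono _ _ (by omega) hj2
      · simp only [hc, if_neg, not_false_iff]
        refine ih (md + 1) b (by omega) (by omega) hb (by omega) ?_ hr
        intro j hj
        have hjmd : j ≤ md.toNat := by omega
        calc ds.getD j 0 ≤ ds.getD md.toNat 0 := mono _ _ hjmd (by omega)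
          _ ≤ mid := by rw [← hmdr]; omega
    · rw [bBisect]
      simp only [hlt, dif_neg, not_false_iff]
      have hba : b = a := by omega
      exact ⟨ha, by omega, fun j hj => hl j hj, fun j hj hj2 => hr j (by omega) hj2⟩

theorem sum_sub_mul (l : List (Int × Int)) (mid : Int) :
    (l.map (fun p => (p.1 - mid) * p.2)).sum
      = (l.map (fun p => p.1 * p.2)).sum - mid * (l.map (fun p => p.2)).sum := by
  induction l with
  | nil => simp
  | cons x t ih => simp [ih]; ring

theorem split_sum (s : List (Int × Int)) (mid : Int) (r : Nat) (hr : r ≤ s.length)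
    (hle : ∀ (j : Nat) (hj : j < s.length), j < r → (s[j]).1 ≤ mid)
    (hgt : ∀ (j : Nat) (hj : j < s.length), r ≤ j → mid < (s[j]).1) :
    ((s.drop r).map (fun p => p.1 * p.2)).sum - mid * ((s.drop r).map (fun p => p.2)).sum
      = (s.map (fun p => max (p.1 - mid) 0 * p.2)).sum := by
  conv_rhs => rw [← List.take_append_drop r s]
  rw [List.map_append, List.sum_append]
  have htake : ((s.take r).map (fun p => max (p.1 - mid) 0 * p.2)).sum = 0 := by
    apply List.sum_eq_zero
    intro x hx
    rw [List.mem_map] at hx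
    obtain ⟨p, hp, rfl⟩ := hx
    rw [List.mem_iff_getElem] at hp
    obtain ⟨j, hj, rfl⟩ := hp
    have hjl : j < s.length := by
      have := List.length_take_le r s; omega
    rw [List.getElem_take]
    have h1 : (s[j]).1 - mid ≤ 0 := by
      have hjr : j < r := by simp [List.length_take] at hj; omega
      have := hle j hjl hjr
      omega
    have : max ((s[j]).1 - mid) 0 = 0 := by omega
    rw [this, zero_mul]
  have hdrop : ((s.drop r).map (fun p => max (p.1 - mid) 0 * p.2)).sum
      = ((s.drop r).map (fun p => (p.1 - mid) * p.2)).sum := by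
    congr 1
    refine List.map_congr_left (fun p hp => ?_)
    rw [List.mem_iff_getElem] at hp
    obtain ⟨j, hj, rfl⟩ := hp
    rw [List.getElem_drop]
    have hjl : r + j < s.length := by simp [List.length_drop] at hj; omega
    have := hgt (r + j) hjl (by omega)
    have hmx : max ((s[r + j]).1 - mid) 0 = (s[r + j]).1 - mid := by omega
    rw [hmx]
  rw [htake, hdrop, sum_sub_mul]
  ring

theorem bTotal_eq_sum (s : List (Int × Int)) (base mid : Int)
    (hmono : (s.map (fun p => p.1)).Pairwise (· ≤ ·)) :
    bTotal base (s.map (fun p => p.1))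
      (s.foldl (fun acc p => (acc.1 ++ [PySem.List.pyGetD acc.1 (-1) 0 + p.2],
                              acc.2 ++ [PySem.List.pyGetD acc.2 (-1) 0 + p.1 * p.2])) ([0], [0])).1
      (s.foldl (fun acc p => (acc.1 ++ [PySem.List.pyGetD acc.1 (-1) 0 + p.2],
                              acc.2 ++ [PySem.List.pyGetD acc.2 (-1) 0 + p.1 * p.2])) ([0], [0])).2
      (s.length) mid
    = base + (s.map (fun p => max (p.1 - mid) 0 * p.2)).sum := by
  rw [PySem.List.foldl_prod_mk
    (fun (acc : List Int) (p : Int × Int) => acc ++ [PySem.List.pyGetD acc (-1) 0 + p.2])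
    (fun (acc : List Int) (p : Int × Int) => acc ++ [PySem.List.pyGetD acc (-1) 0 + p.1 * p.2])
    s [0] [0]]
  unfold bTotal
  set ds := s.map (fun p => (p.1 : Int)) with hds
  have hdsl : ds.length = s.length := by simp [hds]
  have hspec := bisect_spec ds mid hmono (s.length) 0 (s.length)
    (by omega) (by omega) (by omega) (by omega)
    (by intro j hj; omega)
    (by intro j hj hj2; omega)
  obtain ⟨hr0, hrlen, hL, hR⟩ := hspec
  set r := bBisect ds mid 0 (s.length : Int) with hrdef
  have hrn : r = ((r.toNat : Nat) : Int) := by omega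
  have hrle : r.toNat ≤ s.length := by omega
  rw [hrn]
  dsimp only
  rw [prefix_get s (fun p => p.2) s.length (le_refl _),
      prefix_get s (fun p => p.1 * p.2) s.length (le_refl _),
      prefix_get s (fun p => p.2) r.toNat hrle,
      prefix_get s (fun p => p.1 * p.2) r.toNat hrle]
  rw [List.take_length]
  have hsplit : ∀ f : Int × Int → Int,
      (s.map f).sum - ((s.take r.toNat).map f).sum = ((s.drop r.toNat).map f).sum := by
    intro f
    have h2 : ((s.take r.toNat).map f).sum + ((s.drop r.toNat).map f).sum = (s.map f).sum := by
      rw [← List.sum_append, ← List.map_append, List.take_append_drop]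
    omega
  rw [hsplit (fun p => p.1 * p.2), hsplit (fun p => p.2)]
  have hget : ∀ (j : Nat) (hj : j < s.length), ds.getD j 0 = (s[j]).1 := by
    intro j hj
    rw [List.getD_eq_getElem ds 0 (by omega)]
    simp [hds]
  have hle' : ∀ (j : Nat) (hj : j < s.length), j < r.toNat → (s[j]).1 ≤ mid := by
    intro j hj hjr
    rw [← hget j hj]; exact hL j hjr
  have hgt' : ∀ (j : Nat) (hj : j < s.length), r.toNat ≤ j → mid < (s[j]).1 := by
    intro j hj hjr
    rw [← hget j hj]; exact hR j hjr (by omega)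
  have key := split_sum s mid r.toNat hrle hle' hgt'
  linarith [key]

theorem loops_eq (diffs times : List Int) (limit base : Int) (ds pc pdc : List Int) (m : Int)
    (htot : ∀ mid, bTotal base ds pc pdc m mid = aInner diffs times mid) :
    ∀ (fuel : Nat) (lo hi : Int), (hi - lo).toNat ≤ fuel →
      aLoop diffs times limit lo hi = bLoop base ds pc pdc m limit lo hi := by
  intro fuel
  induction fuel with
  | zero =>
    intro lo hi hf
    have : ¬ lo < hi := by omega
    rw [aLoop, bLoop]
    simp [this]
  | succ fuel ih =>
    intro lo hi hf
    by_cases hlt : lo < hi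
    · rw [aLoop, bLoop]
      simp only [hlt, dif_pos]
      have h1 := pvMidLb lo hi hlt
      have h2 := pvMidUb lo hi hlt
      rw [htot]
      by_cases hc : aInner diffs times (PySem.Int.floordiv (lo + hi) 2) > limit
      · simp only [hc, if_pos]
        exact ih _ _ (by omega)
      · simp only [hc, if_neg, not_false_iff]
        exact ih _ _ (by omega)
    · rw [aLoop, bLoop]
      simp [hlt]

theorem solution_spec' : ∀ (diffs : List Int) (times : List Int) (limit : Int), Pre_solution diffs times limit → Spec_solution diffs times limit (solution diffs times limit) := by
  intro diffs times limit hpre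
  unfold Spec_solution solution solution_alt
  cases hmx : PySem.List.max? diffs (fun x => x) with
  | none => rfl
  | some mx =>
    by_cases h1 : mx ≤ 1
    · simp only [h1, if_pos]
      rw [aLoop]
      have : ¬ (1:Int) < mx := by omega
      simp [this]
    · simp only [h1, if_neg, not_false_iff]
      refine loops_eq diffs times limit _ _ _ _ _ ?_ ((mx - 1).toNat) 1 mx (by omega)
      intro mid
      rw [bTotal_eq_sum _ _ _ (PySem.List.sorted_map_key_pairwise _ _)]
      rw [aInner_eq]
      have hperm : (PySem.List.sorted (bBuild diffs times).2 (fun p => p.1) false).Perm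
          (bBuild diffs times).2 := PySem.List.sorted_perm _ _ _
      rw [((hperm.map (fun p => max (p.1 - mid) 0 * p.2)).sum_eq)]
      rw [bBuild_eq]

-- ===== VERDICT (by name: the statement is the Claim_ definition above) =====
theorem solution_spec : Claim_equal_solution := by
  intro diffs times limit _ hpre
  exact solution_spec' diffs times limit hpre
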